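-- pv_equiv track=rewrite | github.com/kiwibrowser/src | tools/boilerplate.py | _CppHeader
-- ===== SOURCE A (Python) =====
-- def _CppHeader(filename):
--   guard = filename.upper() + '_'
--   for char in '/\\.+':
--     guard = guard.replace(char, '_')
--   return '\n'.join([
--     '',
--     '#ifndef ' + guard,
--     '#define ' + guard,
--     '',
--     '#endif  // ' + guard,
--     ''
--   ])
-- ===== SOURCE B (Python) =====
-- def _CppHeader(filename):
--   bad = {'/', '\\', '.', '+'}
--   guard = ''.join('_' if c in bad else c for c in filename.upper()) + '_'
--   return ('\n#ifndef ' + guard +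
--           '\n#define ' + guard +
--           '\n\n#endif  // ' + guard + '\n')
-- ===== Notes on version B (the rewrite author's own statement) =====
-- stated objective: idiomatic
-- what changed: B builds the guard in a single pass over the characters of the uppercased filename, classifying each against a bad-character set, instead of A's four whole-string replace scans, and emits the fixed template by plain concatenation instead of a join over a list of pieces.
import Mathlib
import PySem

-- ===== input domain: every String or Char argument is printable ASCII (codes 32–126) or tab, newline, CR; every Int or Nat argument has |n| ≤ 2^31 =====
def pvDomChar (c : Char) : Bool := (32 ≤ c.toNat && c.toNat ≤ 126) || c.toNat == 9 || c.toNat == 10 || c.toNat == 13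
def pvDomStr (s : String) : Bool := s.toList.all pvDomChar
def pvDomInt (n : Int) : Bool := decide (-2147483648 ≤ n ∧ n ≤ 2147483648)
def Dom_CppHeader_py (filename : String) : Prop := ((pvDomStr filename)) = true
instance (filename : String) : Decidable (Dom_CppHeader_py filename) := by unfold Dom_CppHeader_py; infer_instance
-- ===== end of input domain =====

-- B builds the guard in one pass over the characters (classify each against a bad-character set)
-- instead of A's four whole-string replace scans; objective: idiomatic single pass, same cost class.

-- ===== PORT A =====
-- A: guard = filename.upper() + '_'; then for char in '/\\.+': guard = guard.replace(char,'_'); then '\n'.join(six pieces)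
def CppHeader_py (filename : String) : String :=
  let guard0 : List Char := PySem.Chars.upper filename.toList ++ ['_']
  let guard : List Char :=
    ['/', '\\', '.', '+'].foldl (fun g ch => PySem.Chars.replace g [ch] ['_']) guard0
  String.ofList (PySem.Chars.join ['\n']
    [[], ("#ifndef ".toList ++ guard), ("#define ".toList ++ guard), [],
     ("#endif  // ".toList ++ guard), []])

-- ===== PORT B =====
def pvBad : PySem.Set Char := PySem.Set.ofList ['/', '\\', '.', '+']

-- B: one pass over filename.upper(), '_' for bad characters, then the fixed template by concatenation
def CppHeader_py_alt (filename : String) : String :=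
  let guard : List Char :=
    (PySem.Chars.upper filename.toList).map
      (fun c => if PySem.Set.contains pvBad c then '_' else c) ++ ['_']
  String.ofList (('\n' :: "#ifndef ".toList) ++ guard ++ ('\n' :: "#define ".toList) ++ guard
    ++ ['\n', '\n'] ++ "#endif  // ".toList ++ guard ++ ['\n'])

-- ===== PRECONDITION & SPEC =====
def Spec_CppHeader_py (filename : String) (out : String) : Prop := out = CppHeader_py_alt filename
instance (filename : String) (out : String) : Decidable (Spec_CppHeader_py filename out) := by unfold Spec_CppHeader_py; infer_instance

-- ===== CLAIM (what is proved, stated in full; the proofs are below) =====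
def Claim_equal_CppHeader_py : Prop := ∀ (filename : String), Dom_CppHeader_py filename → Spec_CppHeader_py filename (CppHeader_py filename)

-- ===== LEMMAS AND PROOFS =====

-- replace with a single-char pattern is a per-character substitution
theorem replace_go_single (o n : Char) :
    ∀ (l : List Char) (fuel : Nat) (acc : List Char), l.length ≤ fuel →
      PySem.Chars.replace.go [o] [n] fuel l acc
        = acc.reverse ++ l.map (fun c => if c == o then n else c) := by
  intro l
  induction l with
  | nil =>
      intro fuel acc _
      cases fuel <;> simp [PySem.Chars.replace.go]
  | cons c t ih =>
      intro fuel acc hle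
      cases fuel with
      | zero => simp at hle
      | succ f =>
          simp only [PySem.Chars.replace.go, List.isPrefixOf]
          by_cases h : o = c
          · subst h
            simp only [beq_self_eq_true, Bool.true_and, if_true]
            simpa using ih f (n :: acc) (by simpa using Nat.le_of_succ_le_succ hle)
          · have hb : (o == c) = false := by simp [h]
            have hcb : (c == o) = false := by simp only [beq_eq_false_iff_ne]; exact fun e => h e.symm
            simp only [hb, Bool.false_and, Bool.false_eq_true, if_false, List.map_cons, hcb]
            rw [ih f (c :: acc) (by simpa using Nat.le_of_succ_le_succ hle)]
            simp

theorem replace_single (l : List Char) (o n : Char) :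
    PySem.Chars.replace l [o] [n] = l.map (fun c => if c == o then n else c) := by
  simp only [PySem.Chars.replace, List.isEmpty]
  simpa using replace_go_single o n l l.length [] le_rfl

-- the four chained single-char substitutions equal one classification against the bad set
theorem chain_eq (c : Char) :
    ((fun c => if c == '+' then '_' else c) ∘ (fun c => if c == '.' then '_' else c) ∘
      (fun c => if c == '\\' then '_' else c) ∘ (fun c => if c == '/' then '_' else c)) c
    = if PySem.Set.contains pvBad c then '_' else c := by
  simp only [Function.comp]
  by_cases h1 : c = '/' <;> by_cases h2 : c = '\\' <;> by_cases h3 : c = '.' <;>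
    by_cases h4 : c = '+' <;> simp_all [pvBad, PySem.Set.contains, PySem.Set.ofList, PySem.Set.add]

theorem guard_eq (u : List Char) :
    ['/', '\\', '.', '+'].foldl (fun g ch => PySem.Chars.replace g [ch] ['_']) (u ++ ['_'])
      = u.map (fun c => if PySem.Set.contains pvBad c then '_' else c) ++ ['_'] := by
  simp only [List.foldl_cons, List.foldl_nil, replace_single, List.map_map, List.map_append]
  congr 1
  exact List.map_congr_left (fun c _ => chain_eq c)

-- ===== VERDICT (by name: the statement is the Claim_ definition above) =====
theorem CppHeader_py_spec : Claim_equal_CppHeader_py := by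
  intro filename _
  show CppHeader_py filename = CppHeader_py_alt filename
  simp only [CppHeader_py, CppHeader_py_alt, guard_eq]
  simp [PySem.Chars.join, List.intercalate]
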